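-- pv_equiv track=rewrite | github.com/jayusctrojan/Empire | scripts/promote_to_production.py | extract_department_from_filename
-- ===== SOURCE A (Python) =====
-- DEPARTMENTS = [
--     "it-engineering",
--     "sales-marketing",
--     "customer-support",
--     "operations-hr-supply",
--     "finance-accounting",
--     "project-management",
--     "real-estate",
--     "private-equity-ma",
--     "consulting",
--     "personal-continuing-ed"
-- ]
--
-- def extract_department_from_filename(filename: str):
--     """
--     Extract department from filename
--
--     Expected format: {department}_{asset-name}.{ext}
--     Example: sales-marketing_proposal-generator.yaml
--
--     Returns: (department, clean_filename, is_global)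
--     """
--     if filename.startswith("_global_"):
--         # Global asset
--         clean_name = filename.replace("_global_", "", 1)
--         return ("_global", clean_name, True)
--
--     # Check for department prefix
--     for dept in DEPARTMENTS:
--         if filename.startswith(f"{dept}_"):
--             clean_name = filename.replace(f"{dept}_", "", 1)
--             return (dept, clean_name, False)
--
--     # No department prefix found
--     return (None, filename, False)
-- ===== SOURCE B (Python) =====
-- DEPARTMENTS = [
--     "it-engineering",
--     "sales-marketing",
--     "customer-support",
--     "operations-hr-supply",
--     "finance-accounting",
--     "project-management",
--     "real-estate",
--     "private-equity-ma",
--     "consulting",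
--     "personal-continuing-ed"
-- ]
--
-- DEPARTMENT_SET = set(DEPARTMENTS)
--
-- def extract_department_from_filename(filename: str):
--     """
--     Single character-by-character pass over the filename: accumulate the
--     prefix up to the first underscore, then decide once (empty prefix +
--     'global_' continuation -> global asset; prefix in the department set ->
--     department asset; otherwise no prefix).  Correct because no department
--     name contains an underscore, so A's startswith match is exactly
--     'everything before the first underscore equals the department'.
--     """
--     prefix_chars = []
--     for i, ch in enumerate(filename):
--         if ch == '_':
--             prefix = ''.join(prefix_chars)
--             rest = filename[i + 1:]
--             if prefix == '' and rest.startswith('global_'):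
--                 return ('_global', rest[len('global_'):], True)
--             if prefix in DEPARTMENT_SET:
--                 return (prefix, rest, False)
--             return (None, filename, False)
--         prefix_chars.append(ch)
--     return (None, filename, False)
-- ===== Notes on version B (the rewrite author's own statement) =====
-- stated objective: alternative
-- what changed: Replaces A's scan over the 10 departments (startswith/replace per department, plus a separate _global_ guard) by a single character-by-character pass over the filename that accumulates the prefix up to the first underscore and then decides once: empty prefix with a 'global_' continuation is the global case, otherwise one hash-set membership test of the prefix.
import Mathlib
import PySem

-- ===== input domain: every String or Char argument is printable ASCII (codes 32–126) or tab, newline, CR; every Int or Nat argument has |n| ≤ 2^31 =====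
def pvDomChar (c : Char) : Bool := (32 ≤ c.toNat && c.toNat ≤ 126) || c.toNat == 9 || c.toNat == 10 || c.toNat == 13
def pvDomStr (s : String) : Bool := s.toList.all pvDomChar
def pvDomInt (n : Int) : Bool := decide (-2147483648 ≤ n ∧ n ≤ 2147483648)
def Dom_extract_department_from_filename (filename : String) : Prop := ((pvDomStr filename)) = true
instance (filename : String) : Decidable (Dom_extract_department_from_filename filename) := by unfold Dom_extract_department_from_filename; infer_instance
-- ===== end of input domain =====

-- B replaces A's scan over the department list by one character-by-character pass over the
-- filename that accumulates the prefix up to the first underscore and decides once; same value.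

-- ===== PORT A =====
def pvDeptNames : List String :=
  ["it-engineering", "sales-marketing", "customer-support", "operations-hr-supply",
   "finance-accounting", "project-management", "real-estate", "private-equity-ma",
   "consulting", "personal-continuing-ed"]

-- exact port of Python s.replace(old, "", 1) for the nonempty `old`s used here:
-- remove the first occurrence of `old`, if any (PySem has no count-limited replace)
def pvReplace1 (s old : List Char) : List Char :=
  let i := PySem.Chars.find s old
  if i = -1 then s else s.take i.toNat ++ s.drop (i.toNat + old.length)

def pvDeptLoop (filename : String) : List String → Option String × String × Bool
  | [] => (none, filename, false)
  | d :: rest =>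
    if PySem.Chars.startswith filename.toList (d.toList ++ ['_']) then
      (some d, String.ofList (pvReplace1 filename.toList (d.toList ++ ['_'])), false)
    else pvDeptLoop filename rest

def extract_department_from_filename (filename : String) : Option String × String × Bool :=
  if PySem.Chars.startswith filename.toList "_global_".toList then
    (some "_global", String.ofList (pvReplace1 filename.toList "_global_".toList), true)
  else
    pvDeptLoop filename pvDeptNames

-- ===== PORT B =====
def pvDeptSet : PySem.Set (List Char) := PySem.Set.ofList (pvDeptNames.map String.toList)

-- the for-loop of Source B: `acc` is prefix_chars, the second list the characters still to visit
-- (so at index i the remaining list is exactly filename[i:], and its tail is filename[i+1:])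
def pvScan (filename : String) : List Char → List Char → Option String × String × Bool
  | _, [] => (none, filename, false)
  | acc, c :: t =>
    if c = '_' then
      if acc = [] ∧ PySem.Chars.startswith t "global_".toList = true then
        (some "_global", String.ofList (PySem.Chars.slice t (some 7) none), true)
      else if pvDeptSet.contains acc then
        (some (String.ofList acc), String.ofList t, false)
      else (none, filename, false)
    else pvScan filename (acc ++ [c]) t

def extract_department_from_filename_alt (filename : String) : Option String × String × Bool :=
  pvScan filename [] filename.toList

-- ===== PRECONDITION & SPEC =====
def Spec_extract_department_from_filename (filename : String) (out : Option String × String × Bool) : Prop := out = extract_department_from_filename_alt filename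
instance (filename : String) (out : Option String × String × Bool) : Decidable (Spec_extract_department_from_filename filename out) := by unfold Spec_extract_department_from_filename; infer_instance

-- ===== CLAIM (what is proved, stated in full; the proofs are below) =====
def Claim_equal_extract_department_from_filename : Prop := ∀ (filename : String), Dom_extract_department_from_filename filename → Spec_extract_department_from_filename filename (extract_department_from_filename filename)

-- ===== LEMMAS AND PROOFS =====

-- a prefix is the FIRST occurrence: find = 0
theorem pvFind_eq_zero_of_prefix (s old : List Char) (h : old <+: s) :
    PySem.Chars.find s old = 0 := by
  have h0 : 0 ≤ PySem.Chars.find s old := (PySem.Chars.find_nonneg_iff s old).mpr h.isInfix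
  obtain ⟨h1, h2⟩ := PySem.Chars.find_spec h0
  by_contra hne
  have hpos : 0 < (PySem.Chars.find s old).toNat := by omega
  exact h2 0 hpos (by simpa using h)

theorem pvReplace1_of_prefix (s old : List Char) (h : old <+: s) :
    pvReplace1 s old = s.drop old.length := by
  have h0 : PySem.Chars.find s old = 0 := pvFind_eq_zero_of_prefix s old h
  simp [pvReplace1, h0]

theorem pvEq_of_prefix_underscore (d p t : List Char) (hd : '_' ∉ d) (hp : '_' ∉ p)
    (h : (d ++ ['_']) <+: (p ++ '_' :: t)) : d = p := by
  induction d generalizing p with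
  | nil =>
    cases p with
    | nil => rfl
    | cons c p' =>
      obtain ⟨u, hu⟩ := h
      simp at hu
      exact absurd (by simp [← hu.1]) hp
  | cons c d' ih =>
    cases p with
    | nil =>
      obtain ⟨u, hu⟩ := h
      simp at hu
      exact absurd (by simp [hu.1]) hd
    | cons c' p' =>
      obtain ⟨u, hu⟩ := h
      rw [List.cons_append] at hu
      injection hu with h1 h2
      have hd' : '_' ∉ d' := fun hx => hd (List.mem_cons_of_mem _ hx)
      have hp' : '_' ∉ p' := fun hx => hp (List.mem_cons_of_mem _ hx)
      rw [h1, ih p' hd' hp' ⟨u, h2⟩]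

theorem pvPrefix_underscore_iff (d p t : List Char) (hd : '_' ∉ d) (hp : '_' ∉ p) :
    (d ++ ['_']) <+: (p ++ '_' :: t) ↔ d = p := by
  constructor
  · exact pvEq_of_prefix_underscore d p t hd hp
  · rintro rfl
    exact ⟨t, by simp⟩

-- A's department loop, described through the prefix before the first underscore
theorem pvDeptLoop_of_split (f : String) (p t : List Char) (hs : f.toList = p ++ '_' :: t)
    (hp : '_' ∉ p) :
    ∀ ds : List String, (∀ d ∈ ds, '_' ∉ d.toList) →
      pvDeptLoop f ds =
        if (ds.map String.toList).contains p then
          (some (String.ofList p), String.ofList t, false)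
        else (none, f, false) := by
  intro ds hds
  induction ds with
  | nil => simp [pvDeptLoop]
  | cons d rest ih =>
    have hd : '_' ∉ d.toList := hds d (by simp)
    have hrest : ∀ d' ∈ rest, '_' ∉ d'.toList := fun d' h' => hds d' (by simp [h'])
    by_cases hdp : d.toList = p
    · have hpre : (d.toList ++ ['_']) <+: f.toList := by
        rw [hs]; exact (pvPrefix_underscore_iff d.toList p t hd hp).mpr hdp
      have hsw : PySem.Chars.startswith f.toList (d.toList ++ ['_']) = true :=
        (PySem.Chars.startswith_iff _ _).mpr hpre
      have hrep : pvReplace1 f.toList (d.toList ++ ['_']) = t := by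
        rw [pvReplace1_of_prefix _ _ hpre, hs, hdp]
        have : p ++ '_' :: t = (p ++ ['_']) ++ t := by simp
        rw [this]
        simp
      simp [pvDeptLoop, hsw, hrep, ← hdp]
    · have hsw : ¬ PySem.Chars.startswith f.toList (d.toList ++ ['_']) = true := by
        rw [PySem.Chars.startswith_iff, hs, pvPrefix_underscore_iff d.toList p t hd hp]
        exact hdp
      have hpd : ¬ p = d.toList := fun h => hdp h.symm
      simp [pvDeptLoop, hsw, ih hrest, hpd]

-- A's department loop when the filename contains no underscore at all
theorem pvDeptLoop_no_underscore (f : String) (hm : ('_' : Char) ∉ f.toList) :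
    ∀ ds : List String, pvDeptLoop f ds = (none, f, false) := by
  intro ds
  induction ds with
  | nil => rfl
  | cons d rest ih =>
    have hsw : ¬ PySem.Chars.startswith f.toList (d.toList ++ ['_']) = true := by
      rw [PySem.Chars.startswith_iff]
      intro hpre
      exact hm (hpre.subset (by simp))
    simp [pvDeptLoop, hsw, ih]

-- B's scan when the remaining characters contain no underscore
theorem pvScan_no_underscore (f : String) (acc rem : List Char) (hm : ('_' : Char) ∉ rem) :
    pvScan f acc rem = (none, f, false) := by
  induction rem generalizing acc with
  | nil => rfl
  | cons c t ih =>
    have hc : ¬ c = '_' := fun h => hm (h ▸ List.mem_cons_self)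
    have ht : ('_' : Char) ∉ t := fun h => hm (List.mem_cons_of_mem _ h)
    simp [pvScan, hc, ih _ ht]

-- B's scan up to and through the FIRST underscore of the remaining input
theorem pvScan_split (f : String) (acc p t : List Char) (hp : '_' ∉ p) :
    pvScan f acc (p ++ '_' :: t) =
      if acc ++ p = [] ∧ PySem.Chars.startswith t "global_".toList = true then
        (some "_global", String.ofList (PySem.Chars.slice t (some 7) none), true)
      else if pvDeptSet.contains (acc ++ p) then
        (some (String.ofList (acc ++ p)), String.ofList t, false)
      else (none, f, false) := by
  induction p generalizing acc with
  | nil => simp [pvScan]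
  | cons c p' ih =>
    have hc : ¬ c = '_' := fun h => hp (h ▸ List.mem_cons_self)
    have hp' : '_' ∉ p' := fun h => hp (List.mem_cons_of_mem _ h)
    rw [List.cons_append]
    simp only [pvScan, if_neg hc]
    rw [ih (acc ++ [c]) hp']
    simp

-- ===== VERDICT (by name: the statement is the Claim_ definition above) =====
theorem extract_department_from_filename_spec : Claim_equal_extract_department_from_filename := by
  intro f _
  unfold Spec_extract_department_from_filename
  unfold extract_department_from_filename extract_department_from_filename_alt
  by_cases hg : PySem.Chars.startswith f.toList "_global_".toList = true
  · -- global case: f = "_global_" ++ u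
    obtain ⟨u, hu⟩ := (PySem.Chars.startswith_iff _ _).mp hg
    have hrep : pvReplace1 f.toList "_global_".toList = f.toList.drop 8 :=
      pvReplace1_of_prefix _ _ ⟨u, hu⟩
    have hsplit : f.toList = [] ++ '_' :: ("global_".toList ++ u) := by rw [← hu]; rfl
    have hsw : PySem.Chars.startswith ("global_".toList ++ u) "global_".toList = true :=
      (PySem.Chars.startswith_iff _ _).mpr ⟨u, rfl⟩
    have hdrop : f.toList.drop 8 = u := by rw [← hu]; rfl
    have hslice : PySem.Chars.slice ("global_".toList ++ u) (some 7) none = u := by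
      simp [pysem]
    rw [if_pos hg, hrep, hdrop]
    conv_rhs => rw [hsplit]
    rw [pvScan_split f [] [] ("global_".toList ++ u) (by simp)]
    simp only [List.append_nil]
    rw [if_pos ⟨trivial, hsw⟩, hslice]
  · by_cases hm : ('_' : Char) ∈ f.toList
    · -- f splits as p ++ '_' :: t at the first underscore
      have h0 : 0 ≤ PySem.Chars.find f.toList ['_'] :=
        (PySem.Chars.find_nonneg_iff _ _).mpr ((List.singleton_infix_iff _ _).mpr hm)
      obtain ⟨h1, h2⟩ := PySem.Chars.find_spec h0
      set i := (PySem.Chars.find f.toList ['_']).toNat with hidef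
      obtain ⟨u, hu⟩ := h1
      have hilen : i < f.toList.length := by
        by_contra hge
        rw [List.drop_eq_nil_of_le (by omega)] at hu
        simp at hu
      have hsplit : f.toList = f.toList.take i ++ '_' :: f.toList.drop (i + 1) := by
        conv_lhs => rw [← List.take_append_drop i f.toList]
        congr 1
        have h' : f.toList[i]? = some '_' := by rw [← List.head?_drop, ← hu]; rfl
        rw [List.getElem?_eq_getElem hilen] at h'
        rw [List.drop_eq_getElem_cons hilen]
        congr 1
        exact Option.some.inj h'
      have hplen : (f.toList.take i).length = i := by
        rw [List.length_take, Nat.min_eq_left (Nat.le_of_lt hilen)]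
      have hpnomem : ('_' : Char) ∉ f.toList.take i := by
        intro hx
        obtain ⟨j, hj, hje⟩ := List.mem_iff_getElem.mp hx
        rw [hplen] at hj
        refine h2 j hj ⟨List.drop (j + 1) f.toList, ?_⟩
        rw [List.getElem_take] at hje
        rw [List.drop_eq_getElem_cons (show j < f.toList.length by omega), hje]
        rfl
      have hloop := pvDeptLoop_of_split f (f.toList.take i) (f.toList.drop (i + 1))
        hsplit hpnomem pvDeptNames (by decide)
      have hscan := pvScan_split f [] (f.toList.take i) (f.toList.drop (i + 1)) hpnomem
      -- the global branch of B's decision is impossible when A's _global_ guard failed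
      have hng : ¬ ([] ++ f.toList.take i = [] ∧
          PySem.Chars.startswith (f.toList.drop (i + 1)) "global_".toList = true) := by
        rintro ⟨he, hsw⟩
        rw [List.nil_append] at he
        apply hg
        rw [PySem.Chars.startswith_iff]
        obtain ⟨v, hv⟩ := (PySem.Chars.startswith_iff _ _).mp hsw
        refine ⟨v, ?_⟩
        rw [hsplit, he, ← hv]
        rfl
      have hset : pvDeptSet.contains (f.toList.take i)
          = (pvDeptNames.map String.toList).contains (f.toList.take i) := by
        rw [Bool.eq_iff_iff, PySem.Set.contains_iff, List.contains_iff_mem,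
          pvDeptSet, PySem.Set.mem_ofList]
      rw [if_neg hg, hloop]
      conv_rhs => rw [hsplit]
      rw [hscan, if_neg hng]
      simp only [List.nil_append, hset]
    · -- no underscore at all: both sides fall through
      rw [if_neg hg, pvDeptLoop_no_underscore f hm, pvScan_no_underscore f [] f.toList hm]
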